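-- pv_equiv track=rewrite | github.com/MitraTj/ntu_Cl6226 | group5.py | convert2postings
-- ===== SOURCE A (Python) =====
-- def convert2postings(tokenDoc_pair):
--     postings={}
--     for i,tD in enumerate(tokenDoc_pair):
--         if tD[0] not in postings.keys():
--             postings[tD[0]] = [tD[1]]
--         else:
--             if tD[1] not in postings[tD[0]]:
--                 postings[tD[0]].append(tD[1])
--
--     # Doc ids in the posting list are stored as id directly but wew might change
--     # and store them as gaps.
--     return postings
-- ===== SOURCE B (Python) =====
-- def convert2postings(tokenDoc_pair):
--     # Pass 1: group ALL doc ids per token, no dedup inside the loop.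
--     grouped = {}
--     for token, docid in tokenDoc_pair:
--         grouped.setdefault(token, []).append(docid)
--     # Pass 2: dedup each posting list keeping first-occurrence order.
--     return {token: list(dict.fromkeys(ids)) for token, ids in grouped.items()}
-- ===== Notes on version B (the rewrite author's own statement) =====
-- stated objective: idiomatic
-- what changed: Two visibly separate phases replace A's inline-dedup single pass: first collect every doc id per token with setdefault(...).append, then dedup each list with dict.fromkeys in a comprehension.
import Mathlib
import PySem

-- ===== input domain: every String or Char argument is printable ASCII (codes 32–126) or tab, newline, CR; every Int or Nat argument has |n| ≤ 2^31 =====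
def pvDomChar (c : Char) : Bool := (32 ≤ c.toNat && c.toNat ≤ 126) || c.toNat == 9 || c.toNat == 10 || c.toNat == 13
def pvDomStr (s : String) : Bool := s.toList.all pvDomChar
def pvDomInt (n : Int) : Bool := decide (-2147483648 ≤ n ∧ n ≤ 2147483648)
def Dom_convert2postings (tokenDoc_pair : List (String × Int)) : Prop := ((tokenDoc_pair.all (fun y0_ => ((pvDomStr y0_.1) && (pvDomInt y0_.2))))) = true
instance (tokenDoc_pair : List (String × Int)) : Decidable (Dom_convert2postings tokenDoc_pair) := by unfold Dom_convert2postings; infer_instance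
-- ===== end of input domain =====

-- B replaces A's single pass with inline list-membership dedup by two separate phases:
-- collect every doc id per token, then dedup each posting list (dict.fromkeys order).
-- Equivalence of the RETURN value is proved; A returns on every input (no Pre_).

-- ===== PORT A =====
-- one loop step of A: fresh token → new singleton list; known token → append the id
-- unless it is already in that token's list ('postings[tD[0]]' exists in the else
-- branch, so getD with default [] is exact there)
def convert2postingsStepA (d : PySem.Dict String (List Int)) (tD : String × Int) :
    PySem.Dict String (List Int) :=
  if d.contains tD.1 = false then d.insert tD.1 [tD.2]
  else if tD.2 ∈ d.getD tD.1 [] then d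
  else d.modify tD.1 [] (· ++ [tD.2])

def convert2postings (tokenDoc_pair : List (String × Int)) : List (String × List Int) :=
  (tokenDoc_pair.foldl convert2postingsStepA PySem.Dict.empty).items

-- ===== PORT B =====
def convert2postings_alt (tokenDoc_pair : List (String × Int)) : List (String × List Int) :=
  -- pass 1: grouped.setdefault(token, []).append(docid)
  let grouped := tokenDoc_pair.foldl
    (fun d p => d.modify p.1 [] (· ++ [p.2])) PySem.Dict.empty
  -- pass 2: {token: list(dict.fromkeys(ids)) for token, ids in grouped.items()}
  grouped.items.map (fun p => (p.1, PySem.List.dedup p.2))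

-- ===== PRECONDITION & SPEC =====
def Spec_convert2postings (tokenDoc_pair : List (String × Int)) (out : List (String × List Int)) : Prop := out = convert2postings_alt tokenDoc_pair
instance (tokenDoc_pair : List (String × Int)) (out : List (String × List Int)) : Decidable (Spec_convert2postings tokenDoc_pair out) := by unfold Spec_convert2postings; infer_instance

-- ===== CLAIM (what is proved, stated in full; the proofs are below) =====
def Claim_equal_convert2postings : Prop := ∀ (tokenDoc_pair : List (String × Int)), Dom_convert2postings tokenDoc_pair → Spec_convert2postings tokenDoc_pair (convert2postings tokenDoc_pair)

-- ===== LEMMAS AND PROOFS =====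

-- the dedup-image of a dict: same keys in the same order, each value deduped
def pvMapd (d : PySem.Dict String (List Int)) : PySem.Dict String (List Int) :=
  PySem.Dict.mk (d.items.map (fun p => (p.1, PySem.List.dedup p.2)))

theorem pvItems_mapd (d : PySem.Dict String (List Int)) :
    (pvMapd d).items = d.items.map (fun p => (p.1, PySem.List.dedup p.2)) := rfl

theorem pvKeys_mapd (d : PySem.Dict String (List Int)) :
    (pvMapd d).keys = d.keys := by
  simp only [PySem.Dict.keys, pvItems_mapd, List.map_map]
  rfl

theorem pvGet?_mapd (d : PySem.Dict String (List Int)) (k : String) :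
    (pvMapd d).get? k = (d.get? k).map PySem.List.dedup := by
  obtain ⟨l⟩ := d
  induction l with
  | nil => rfl
  | cons p rest ih =>
    have h : pvMapd (PySem.Dict.mk (p :: rest)) =
        PySem.Dict.mk ((p.1, PySem.List.dedup p.2) ::
          rest.map (fun q => (q.1, PySem.List.dedup q.2))) := rfl
    rw [h, PySem.Dict.get?_mk_cons, PySem.Dict.get?_mk_cons]
    by_cases hk : p.1 == k
    · simp [hk]
    · simp only [hk, Bool.false_eq_true, if_false]
      exact ih

theorem pvContains_mapd (d : PySem.Dict String (List Int)) (k : String) :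
    (pvMapd d).contains k = d.contains k := by
  rw [PySem.Dict.contains_eq_isSome_get?, PySem.Dict.contains_eq_isSome_get?,
    pvGet?_mapd]
  cases d.get? k <;> rfl

theorem pvMapd_insert (d : PySem.Dict String (List Int)) (k : String) (v : List Int) :
    pvMapd (d.insert k v) = (pvMapd d).insert k (PySem.List.dedup v) := by
  apply PySem.Dict.ext
  rw [pvItems_mapd, PySem.Dict.items_insert, PySem.Dict.items_insert,
    pvContains_mapd, pvItems_mapd]
  by_cases hc : d.contains k
  · simp only [hc, if_true, List.map_map]
    apply List.map_congr_left
    intro p _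
    by_cases hk : p.1 = k <;> simp [hk]
  · simp [hc]

theorem pvDedup_append_singleton (v : List Int) (x : Int) :
    PySem.List.dedup (v ++ [x]) =
      if x ∈ v then PySem.List.dedup v else PySem.List.dedup v ++ [x] := by
  rw [PySem.List.dedup_eq_ofList, PySem.List.dedup_eq_ofList,
    PySem.Set.ofList_eq_foldl, PySem.Set.ofList_eq_foldl, List.foldl_append]
  simp only [List.foldl_cons, List.foldl_nil, PySem.Set.add]
  have hmem : (List.foldl PySem.Set.add [] v).contains x = decide (x ∈ v) := by
    rw [← PySem.Set.ofList_eq_foldl]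
    by_cases hx : x ∈ v <;>
      simp [PySem.Set.contains, hx, PySem.Set.mem_ofList]
  rw [hmem]
  by_cases hx : x ∈ v <;> simp [hx]

theorem pvInsert_get?_self (d : PySem.Dict String (List Int)) (k : String)
    (v : List Int) (hnd : d.keys.Nodup) (hv : d.get? k = some v) :
    d.insert k v = d := by
  apply PySem.Dict.ext
  have hc : d.contains k = true := by
    rw [PySem.Dict.contains_eq_isSome_get?, hv]; rfl
  rw [PySem.Dict.items_insert, hc, if_pos rfl]
  conv_rhs => rw [← List.map_id d.items]
  apply List.map_congr_left
  intro p hp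
  by_cases hk : p.1 == k
  · have hk' : p.1 = k := by simpa using hk
    have := PySem.Dict.get?_of_mem_items d hp hnd
    rw [hk', hv] at this
    simp only [hk, if_true, id]
    obtain ⟨p1, p2⟩ := p
    simp only at hk' this
    simp [hk', (Option.some.injEq _ _).mp this]
  · simp [hk]

-- the step of A applied to the dedup-image is the dedup-image of B's step
theorem pvStep_comm (d : PySem.Dict String (List Int)) (p : String × Int)
    (hnd : d.keys.Nodup) :
    convert2postingsStepA (pvMapd d) p = pvMapd (d.modify p.1 [] (· ++ [p.2])) := by
  have hmod : d.modify p.1 [] (· ++ [p.2]) = d.insert p.1 (d.getD p.1 [] ++ [p.2]) := rfl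
  rw [hmod, pvMapd_insert, pvDedup_append_singleton]
  unfold convert2postingsStepA
  rw [pvContains_mapd]
  by_cases hc : d.contains p.1
  · -- token already present
    have hsome : ∃ v, d.get? p.1 = some v := by
      rw [PySem.Dict.contains_eq_isSome_get?] at hc
      exact Option.isSome_iff_exists.mp hc
    obtain ⟨v, hv⟩ := hsome
    have hgD : d.getD p.1 [] = v := PySem.Dict.getD_of_get?_eq_some d [] hv
    have hgDm : (pvMapd d).getD p.1 [] = PySem.List.dedup v := by
      rw [PySem.Dict.getD_eq_get?_getD, pvGet?_mapd, hv]; rfl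
    simp only [hc, Bool.true_eq_false, if_false, hgD, hgDm]
    by_cases hx : p.2 ∈ v
    · have hxd : p.2 ∈ PySem.List.dedup v := (PySem.List.mem_dedup v p.2).mpr hx
      rw [if_pos hxd, if_pos hx]
      exact (pvInsert_get?_self (pvMapd d) p.1 (PySem.List.dedup v)
        (by rw [pvKeys_mapd]; exact hnd)
        (by rw [pvGet?_mapd, hv]; rfl)).symm
    · have hxd : p.2 ∉ PySem.List.dedup v := fun h => hx ((PySem.List.mem_dedup v p.2).mp h)
      rw [if_neg hxd, if_neg hx]
      show (pvMapd d).insert p.1 ((pvMapd d).getD p.1 [] ++ [p.2]) = _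
      rw [hgDm]
  · -- fresh token
    have hgD : d.getD p.1 [] = [] := PySem.Dict.getD_of_not_contains d [] (by simpa using hc)
    simp [hc, hgD]

theorem pvFold_comm (l : List (String × Int)) (d : PySem.Dict String (List Int))
    (hnd : d.keys.Nodup) :
    l.foldl convert2postingsStepA (pvMapd d) =
      pvMapd (l.foldl (fun d p => d.modify p.1 [] (· ++ [p.2])) d) := by
  induction l generalizing d with
  | nil => rfl
  | cons p rest ih =>
    simp only [List.foldl_cons]
    rw [pvStep_comm d p hnd]
    exact ih _ (by
      have := PySem.Dict.nodup_keys_foldl_modify_key [p] Prod.fst []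
        (fun _ q => (· ++ [q.2])) d hnd
      simpa using this)

-- ===== VERDICT (by name: the statement is the Claim_ definition above) =====
theorem convert2postings_spec : Claim_equal_convert2postings := by
  intro l _
  show convert2postings l = convert2postings_alt l
  unfold convert2postings convert2postings_alt
  have h0 : (PySem.Dict.empty : PySem.Dict String (List Int)) = pvMapd PySem.Dict.empty := rfl
  rw [h0, pvFold_comm l PySem.Dict.empty PySem.Dict.nodup_keys_empty]
  rfl
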